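-- pv_equiv track=rewrite | github.com/tsilva/gymnasium-solver | utils/dict_utils.py | sort_subkeys_by_priority
-- ===== SOURCE A (Python) =====
-- from typing import Any, Dict, Iterable, Mapping, List
--
-- def sort_subkeys_by_priority(
--     grouped: Dict[str, Dict[str, Any]],
--     ns_order: Iterable[str],
--     key_priority_map: Mapping[str, int] | None = None,
-- ) -> Dict[str, Dict[str, Any]]:
--     """Return a copy of ``grouped`` with each namespace's subkeys sorted.
--
--     Sorting respects ``key_priority_map`` where lower index wins. Keys not in
--     the priority map are ordered by case-insensitive subkey.
--
--     The priority map is indexed by full metric key (e.g., ``"ns/sub"``). For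
--     empty subkeys, the full key is just the namespace (matching callers).
--     """
--
--     def sort_key(namespace: str, subkey: str):
--         if key_priority_map:
--             full_key = f"{namespace}/{subkey}" if subkey else namespace
--             idx = key_priority_map.get(full_key)
--             if idx is not None:
--                 return (0, idx)
--         return (1, subkey.lower())
--
--     out: Dict[str, Dict[str, Any]] = dict(grouped)
--     for ns in ns_order:
--         sub = grouped.get(ns)
--         if not sub:
--             continue
--         out[ns] = dict(sorted(sub.items(), key=lambda kv: sort_key(ns, kv[0])))
--     return out
-- ===== SOURCE B (Python) =====
-- def sort_subkeys_by_priority(grouped, ns_order, key_priority_map=None):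
--     pm = key_priority_map or {}
--     out = dict(grouped)
--     for ns in ns_order:
--         sub = grouped.get(ns)
--         if not sub:
--             continue
--         def full(k):
--             return f"{ns}/{k}" if k else ns
--         prio = sorted([(pm[full(k)], k, v) for k, v in sub.items() if full(k) in pm],
--                       key=lambda t: t[0])
--         rest = sorted([(k, v) for k, v in sub.items() if full(k) not in pm],
--                       key=lambda kv: kv[0].lower())
--         out[ns] = dict([(k, v) for _, k, v in prio] + rest)
--     return out
-- ===== Notes on version B (the rewrite author's own statement) =====
-- stated objective: alternative
-- what changed: B partitions each namespace's items into map-prioritized and unprioritized groups, sorts the two groups independently (by map index, resp. lowercased subkey) and concatenates them, instead of A's single sort under a composite (group, rank) key.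
import Mathlib
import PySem

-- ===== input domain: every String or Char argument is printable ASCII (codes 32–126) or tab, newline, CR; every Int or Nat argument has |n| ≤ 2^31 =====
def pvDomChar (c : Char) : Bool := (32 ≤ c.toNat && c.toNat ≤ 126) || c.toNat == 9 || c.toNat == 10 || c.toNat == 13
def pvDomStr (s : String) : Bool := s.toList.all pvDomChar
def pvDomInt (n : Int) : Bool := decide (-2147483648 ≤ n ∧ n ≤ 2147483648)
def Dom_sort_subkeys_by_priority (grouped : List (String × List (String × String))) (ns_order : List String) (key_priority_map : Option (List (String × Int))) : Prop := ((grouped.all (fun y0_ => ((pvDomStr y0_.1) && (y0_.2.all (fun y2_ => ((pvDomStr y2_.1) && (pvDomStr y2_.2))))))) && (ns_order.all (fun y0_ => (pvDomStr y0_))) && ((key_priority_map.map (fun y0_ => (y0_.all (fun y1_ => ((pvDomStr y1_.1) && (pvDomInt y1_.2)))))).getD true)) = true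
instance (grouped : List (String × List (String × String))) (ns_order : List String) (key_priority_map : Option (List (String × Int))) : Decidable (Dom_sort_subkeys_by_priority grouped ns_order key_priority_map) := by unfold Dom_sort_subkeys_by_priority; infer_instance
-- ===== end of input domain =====

-- B replaces A's single sort under a composite (group, rank) key by a partition into
-- prioritized / unprioritized items with two independent sorts; same cost, different decomposition.
-- Both functions are pure on the Python side (dict(grouped) is a shallow copy; nothing is mutated).

-- ===== PORT A =====
-- full_key = f"{ns}/{subkey}" if subkey else ns
def pvFullKey (ns k : String) : String := if k = "" then ns else ns ++ "/" ++ k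

-- A's sort_key: Python returns (0, idx) or (1, subkey.lower()); tuple comparison never mixes
-- idx with a string, so the key is modelled exactly by the pair (0, (idx, "")) / (1, (0, lower)),
-- whose second component is compared lexicographically (Lex); sorted2 is PySem's tuple-key sort.
def pvSortKeyA (truthy : Bool) (pm : PySem.Dict String Int) (ns k : String) :
    Int × Lex (Int × String) :=
  if truthy then
    match pm.get? (pvFullKey ns k) with
    | some i => (0, toLex (i, ""))
    | none => (1, toLex (0, PySem.Str.lower k))
  else (1, toLex (0, PySem.Str.lower k))

def sort_subkeys_by_priority (grouped : List (String × List (String × String))) (ns_order : List String) (key_priority_map : Option (List (String × Int))) : List (String × List (String × String)) :=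
  -- marshalling: Python receives dicts (of dicts); duplicate keys collapse as in dict(...)
  let g : PySem.Dict String (PySem.Dict String String) :=
    PySem.Dict.ofList (grouped.map (fun p => (p.1, PySem.Dict.ofList p.2)))
  let pm : PySem.Dict String Int := PySem.Dict.ofList (key_priority_map.getD [])
  let truthy : Bool := !pm.items.isEmpty          -- `if key_priority_map:` (None and {} falsy)
  let out := ns_order.foldl (fun out ns =>
    match g.get? ns with
    | none => out                                  -- sub is None → `if not sub: continue`
    | some sub =>
      if sub.items.isEmpty then out                -- empty sub-dict is falsy
      else out.insert ns (PySem.Dict.ofList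
        (PySem.List.sorted2 sub.items (fun kv => (pvSortKeyA truthy pm ns kv.1).1)
          (fun kv => (pvSortKeyA truthy pm ns kv.1).2) false))) g
  out.items.map (fun p => (p.1, p.2.items))

-- ===== PORT B =====
def sort_subkeys_by_priority_alt (grouped : List (String × List (String × String))) (ns_order : List String) (key_priority_map : Option (List (String × Int))) : List (String × List (String × String)) :=
  let g : PySem.Dict String (PySem.Dict String String) :=
    PySem.Dict.ofList (grouped.map (fun p => (p.1, PySem.Dict.ofList p.2)))
  -- pm = key_priority_map or {} : the marshalled dict (None → {})
  let pm : PySem.Dict String Int := PySem.Dict.ofList (key_priority_map.getD [])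
  let out := ns_order.foldl (fun out ns =>
    match g.get? ns with
    | none => out
    | some sub =>
      if sub.items.isEmpty then out
      else
        -- prio = sorted([(pm[full(k)], k, v) for k,v in sub.items() if full(k) in pm], key=t[0])
        -- (pm[full(k)] is evaluated under the membership guard, hence the getD 0 is exact)
        let pr := PySem.List.sorted
          ((sub.items.filter (fun kv => (pm.get? (pvFullKey ns kv.1)).isSome)).map
            (fun kv => ((pm.get? (pvFullKey ns kv.1)).getD 0, kv.1, kv.2)))
          (fun t => t.1) false
        -- rest = sorted([(k, v) for k,v in sub.items() if full(k) not in pm], key=kv[0].lower())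
        let rs := PySem.List.sorted
          (sub.items.filter (fun kv => !(pm.get? (pvFullKey ns kv.1)).isSome))
          (fun kv => PySem.Str.lower kv.1) false
        out.insert ns (PySem.Dict.ofList (pr.map (fun t => (t.2.1, t.2.2)) ++ rs))) g
  out.items.map (fun p => (p.1, p.2.items))

-- ===== PRECONDITION & SPEC =====
def Spec_sort_subkeys_by_priority (grouped : List (String × List (String × String))) (ns_order : List String) (key_priority_map : Option (List (String × Int))) (out : List (String × List (String × String))) : Prop := out = sort_subkeys_by_priority_alt grouped ns_order key_priority_map
instance (grouped : List (String × List (String × String))) (ns_order : List String) (key_priority_map : Option (List (String × Int))) (out : List (String × List (String × String))) : Decidable (Spec_sort_subkeys_by_priority grouped ns_order key_priority_map out) := by unfold Spec_sort_subkeys_by_priority; infer_instance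

-- ===== CLAIM (what is proved, stated in full; the proofs are below) =====
def Claim_equal_sort_subkeys_by_priority : Prop := ∀ (grouped : List (String × List (String × String))) (ns_order : List String) (key_priority_map : Option (List (String × Int))), Dom_sort_subkeys_by_priority grouped ns_order key_priority_map → Spec_sort_subkeys_by_priority grouped ns_order key_priority_map (sort_subkeys_by_priority grouped ns_order key_priority_map)

-- ===== LEMMAS AND PROOFS =====

-- inserting x when x comes before the whole right block B stays inside the left block
theorem pv_insertBy_all_before {α : Type} (bef : α → α → Bool) (x : α) (A B : List α)
    (h : ∀ b ∈ B, bef x b = true) :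
    PySem.List.insertBy bef x (A ++ B) = PySem.List.insertBy bef x A ++ B := by
  induction A with
  | nil =>
    cases B with
    | nil => rfl
    | cons b bs => simp [PySem.List.insertBy, h b (by simp)]
  | cons a A ih =>
    by_cases hba : bef x a = true <;>
      simp [PySem.List.insertBy, hba, ih]

-- inserting x when x never comes before the left block A lands in the right block
theorem pv_insertBy_none_before {α : Type} (bef : α → α → Bool) (x : α) (A B : List α)
    (h : ∀ a ∈ A, bef x a = false) :
    PySem.List.insertBy bef x (A ++ B) = A ++ PySem.List.insertBy bef x B := by
  induction A with
  | nil => rfl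
  | cons a A ih =>
    have := h a (by simp)
    simp [PySem.List.insertBy, this, ih (fun a ha => h a (by simp [ha]))]

-- stable insertion sort splits along a p-block: running it on accT ++ accF keeps the groups apart
theorem pv_foldl_insertBy_split {α : Type} (bef : α → α → Bool) (p : α → Bool)
    (hTF : ∀ a b : α, p a = true → p b = false → bef a b = true)
    (hFT : ∀ a b : α, p a = false → p b = true → bef a b = false) :
    ∀ (xs accT accF : List α), (∀ a ∈ accT, p a = true) → (∀ b ∈ accF, p b = false) →
      xs.foldl (fun acc x => PySem.List.insertBy bef x acc) (accT ++ accF)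
        = (xs.filter p).foldl (fun acc x => PySem.List.insertBy bef x acc) accT
          ++ (xs.filter (fun x => !p x)).foldl (fun acc x => PySem.List.insertBy bef x acc) accF := by
  intro xs
  induction xs with
  | nil => intro accT accF _ _; rfl
  | cons x xs ih =>
    intro accT accF hT hF
    by_cases hp : p x = true
    · have h1 : PySem.List.insertBy bef x (accT ++ accF)
          = PySem.List.insertBy bef x accT ++ accF :=
        pv_insertBy_all_before bef x accT accF (fun b hb => hTF x b hp (hF b hb))
      have hT' : ∀ a ∈ PySem.List.insertBy bef x accT, p a = true := by
        intro a ha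
        rcases (PySem.List.mem_insertBy _ _ _ _).1 ha with rfl | ha'
        · exact hp
        · exact hT a ha'
      simp only [List.foldl_cons, List.filter_cons, hp, Bool.not_true, h1]
      simpa using ih (PySem.List.insertBy bef x accT) accF hT' hF
    · have hp' : p x = false := by simpa using hp
      have h1 : PySem.List.insertBy bef x (accT ++ accF)
          = accT ++ PySem.List.insertBy bef x accF :=
        pv_insertBy_none_before bef x accT accF (fun a ha => hFT x a hp' (hT a ha))
      have hF' : ∀ b ∈ PySem.List.insertBy bef x accF, p b = false := by
        intro b hb
        rcases (PySem.List.mem_insertBy _ _ _ _).1 hb with rfl | hb'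
        · exact hp'
        · exact hF b hb'
      simp only [List.foldl_cons, List.filter_cons, hp', Bool.not_false, h1]
      simpa using ih accT (PySem.List.insertBy bef x accF) hT hF'

-- insertBy only queries bef at (x, member of ys)
theorem pv_insertBy_congr {α : Type} (bef1 bef2 : α → α → Bool) (x : α) (ys : List α)
    (h : ∀ y ∈ ys, bef1 x y = bef2 x y) :
    PySem.List.insertBy bef1 x ys = PySem.List.insertBy bef2 x ys := by
  induction ys with
  | nil => rfl
  | cons y ys ih =>
    have hy := h y (by simp)
    by_cases hb : bef1 x y = true <;>
      simp [PySem.List.insertBy, hb, hy ▸ hb, ih (fun y hy' => h y (by simp [hy']))]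

-- the whole insertion sort only queries bef on pairs drawn from acc ∪ xs
theorem pv_foldl_insertBy_congr {α : Type} (bef1 bef2 : α → α → Bool) :
    ∀ (xs acc : List α),
      (∀ a b : α, (a ∈ acc ∨ a ∈ xs) → (b ∈ acc ∨ b ∈ xs) → bef1 a b = bef2 a b) →
      xs.foldl (fun acc x => PySem.List.insertBy bef1 x acc) acc
        = xs.foldl (fun acc x => PySem.List.insertBy bef2 x acc) acc := by
  intro xs
  induction xs with
  | nil => intro acc _; rfl
  | cons x xs ih =>
    intro acc h
    have h1 : PySem.List.insertBy bef1 x acc = PySem.List.insertBy bef2 x acc :=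
      pv_insertBy_congr bef1 bef2 x acc
        (fun y hy => h x y (Or.inr (by simp)) (Or.inl hy))
    simp only [List.foldl_cons, h1]
    refine ih (PySem.List.insertBy bef2 x acc) ?_
    intro a b ha hb
    have mem : ∀ c : α, (c ∈ PySem.List.insertBy bef2 x acc ∨ c ∈ xs) → (c ∈ acc ∨ c ∈ x :: xs) := by
      intro c hc
      rcases hc with hc | hc
      · rcases (PySem.List.mem_insertBy _ _ _ _).1 hc with rfl | hc'
        · exact Or.inr (by simp)
        · exact Or.inl hc'
      · exact Or.inr (by simp [hc])
    exact h a b (mem a ha) (mem b hb)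

theorem pv_insertBy_map {α β : Type} (bef : β → β → Bool) (f : α → β) (x : α) (ys : List α) :
    PySem.List.insertBy bef (f x) (ys.map f)
      = (PySem.List.insertBy (fun a b => bef (f a) (f b)) x ys).map f := by
  induction ys with
  | nil => rfl
  | cons y ys ih =>
    by_cases hb : bef (f x) (f y) = true <;> simp [PySem.List.insertBy, hb, ih]

theorem pv_foldl_insertBy_map {α β : Type} (bef : β → β → Bool) (f : α → β) :
    ∀ (xs acc : List α),
      (xs.map f).foldl (fun acc x => PySem.List.insertBy bef x acc) (acc.map f)
        = (xs.foldl (fun acc x => PySem.List.insertBy (fun a b => bef (f a) (f b)) x acc) acc).map f := by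
  intro xs
  induction xs with
  | nil => intro acc; rfl
  | cons x xs ih =>
    intro acc
    simp only [List.map_cons, List.foldl_cons]
    rw [pv_insertBy_map bef f x acc]
    exact ih (PySem.List.insertBy (fun a b => bef (f a) (f b)) x acc)

-- A's key function, in its "truthy" normal form (proof-only helper)
def pvKeyT (pm : PySem.Dict String Int) (ns : String) (kv : String × String) :
    Int × Lex (Int × String) :=
  match pm.get? (pvFullKey ns kv.1) with
  | some i => (0, toLex (i, ""))
  | none => (1, toLex (0, PySem.Str.lower kv.1))

-- the comparison sorted2 performs on A's tuple key
def pvBefA (pm : PySem.Dict String Int) (ns : String) (a b : String × String) : Bool :=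
  decide ((pvKeyT pm ns a).1 < (pvKeyT pm ns b).1) ||
    (!decide ((pvKeyT pm ns b).1 < (pvKeyT pm ns a).1) &&
      decide ((pvKeyT pm ns a).2 < (pvKeyT pm ns b).2))

theorem pv_sorted2_eq_foldl {α κ₁ κ₂ : Type} [LT κ₁] [DecidableLT κ₁] [LT κ₂] [DecidableLT κ₂]
    (xs : List α) (k1 : α → κ₁) (k2 : α → κ₂) :
    PySem.List.sorted2 xs k1 k2 false
      = xs.foldl (fun acc x => PySem.List.insertBy
          (fun a b => decide (k1 a < k1 b) || (!decide (k1 b < k1 a) && decide (k2 a < k2 b)))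
          x acc) [] := rfl

theorem pv_keyA_eq (pm : PySem.Dict String Int) (ns : String) (kv : String × String) :
    pvSortKeyA (!pm.items.isEmpty) pm ns kv.1 = pvKeyT pm ns kv := by
  by_cases h : pm.items.isEmpty = true
  · have hpm : pm = PySem.Dict.empty := PySem.Dict.ext (by simpa using h)
    simp [pvSortKeyA, pvKeyT, hpm]
  · simp only [Bool.not_eq_true] at h
    simp [pvSortKeyA, pvKeyT, h]

-- the heart: one composite-key sort = prioritized-by-index sort ++ rest-by-lowercase sort
theorem pv_inner_eq (pm : PySem.Dict String Int) (ns : String) (xs : List (String × String)) :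
    PySem.List.sorted2 xs (fun kv => (pvKeyT pm ns kv).1) (fun kv => (pvKeyT pm ns kv).2) false
      = ((PySem.List.sorted
            ((xs.filter (fun kv => (pm.get? (pvFullKey ns kv.1)).isSome)).map
              (fun kv => ((pm.get? (pvFullKey ns kv.1)).getD 0, kv.1, kv.2)))
            (fun t => t.1) false).map (fun t => (t.2.1, t.2.2)))
        ++ PySem.List.sorted
            (xs.filter (fun kv => !(pm.get? (pvFullKey ns kv.1)).isSome))
            (fun kv => PySem.Str.lower kv.1) false := by
  set p : (String × String) → Bool := fun kv => (pm.get? (pvFullKey ns kv.1)).isSome with hp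
  set dec : (String × String) → Int × String × String :=
    fun kv => ((pm.get? (pvFullKey ns kv.1)).getD 0, kv.1, kv.2) with hdec
  have hK0 : ∀ a : String × String, p a = true →
      ∃ i, pm.get? (pvFullKey ns a.1) = some i ∧ pvKeyT pm ns a = (0, toLex (i, "")) := by
    intro a ha
    rcases Option.isSome_iff_exists.1 ha with ⟨i, hi⟩
    exact ⟨i, hi, by simp [pvKeyT, hi]⟩
  have hK1 : ∀ a : String × String, p a = false →
      pvKeyT pm ns a = (1, toLex (0, PySem.Str.lower a.1)) := by
    intro a ha
    have h' : pm.get? (pvFullKey ns a.1) = none := by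
      simpa [hp, Option.isSome_iff_exists] using ha
    simp [pvKeyT, h']
  rw [pv_sorted2_eq_foldl]
  have hbef : (fun a b : String × String =>
      decide ((pvKeyT pm ns a).1 < (pvKeyT pm ns b).1) ||
        (!decide ((pvKeyT pm ns b).1 < (pvKeyT pm ns a).1) &&
          decide ((pvKeyT pm ns a).2 < (pvKeyT pm ns b).2))) = pvBefA pm ns := rfl
  rw [hbef]
  -- 1. split the composite sort along p
  have hsplit : xs.foldl (fun acc x => PySem.List.insertBy (pvBefA pm ns) x acc) []
      = (xs.filter p).foldl (fun acc x => PySem.List.insertBy (pvBefA pm ns) x acc) []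
        ++ (xs.filter (fun kv => !p kv)).foldl
            (fun acc x => PySem.List.insertBy (pvBefA pm ns) x acc) [] := by
    have := pv_foldl_insertBy_split (pvBefA pm ns) p
      (by
        intro a b ha hb
        rcases hK0 a ha with ⟨ia, _, hKa⟩
        have hKb := hK1 b hb
        simp only [pvBefA, hKa, hKb]
        norm_num)
      (by
        intro a b ha hb
        rcases hK0 b hb with ⟨ib, _, hKb⟩
        have hKa := hK1 a ha
        simp only [pvBefA, hKa, hKb]
        norm_num)
      xs [] [] (by simp) (by simp)
    simpa using this
  rw [hsplit]
  congr 1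
  -- 2. prioritized part
  · have hmap : PySem.List.sorted ((xs.filter p).map dec) (fun t => t.1) false
        = ((xs.filter p).foldl
            (fun acc x => PySem.List.insertBy
              (fun a b => decide ((dec a).1 < (dec b).1)) x acc) []).map dec := by
      rw [PySem.List.sorted_eq_foldl_insertBy]
      simpa using
        pv_foldl_insertBy_map (fun a b : Int × String × String => decide (a.1 < b.1))
          dec (xs.filter p) []
    rw [hmap, List.map_map]
    have hid : ((fun t : Int × String × String => (t.2.1, t.2.2)) ∘ dec)
        = fun kv : String × String => kv := rfl
    rw [hid, List.map_id']
    refine pv_foldl_insertBy_congr _ _ (xs.filter p) [] ?_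
    intro a b ha hb
    rcases ha with ha | ha
    · simp at ha
    rcases hb with hb | hb
    · simp at hb
    have hpa : p a = true := (List.mem_filter.1 ha).2
    have hpb : p b = true := (List.mem_filter.1 hb).2
    rcases hK0 a hpa with ⟨ia, hia, hKa⟩
    rcases hK0 b hpb with ⟨ib, hib, hKb⟩
    simp only [pvBefA, hKa, hKb, hdec, hia, hib, Option.getD_some, lt_irrefl,
      decide_false, Bool.not_false, Bool.false_or, Bool.true_and]
    refine decide_eq_decide.2 ?_
    rw [Prod.Lex.lt_iff]
    constructor
    · rintro (h' | ⟨_, hss⟩)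
      · exact h'
      · exact absurd hss (lt_irrefl _)
    · intro hlt
      exact Or.inl hlt
  -- 3. rest part
  · rw [PySem.List.sorted_eq_foldl_insertBy]
    refine pv_foldl_insertBy_congr _ _ (xs.filter (fun kv => !p kv)) [] ?_
    intro a b ha hb
    rcases ha with ha | ha
    · simp at ha
    rcases hb with hb | hb
    · simp at hb
    have hpa : p a = false := by simpa using (List.mem_filter.1 ha).2
    have hpb : p b = false := by simpa using (List.mem_filter.1 hb).2
    have hKa := hK1 a hpa
    have hKb := hK1 b hpb
    simp only [pvBefA, hKa, hKb, lt_irrefl, decide_false, Bool.not_false, Bool.false_or,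
      Bool.true_and]
    refine decide_eq_decide.2 ?_
    rw [Prod.Lex.lt_iff]
    constructor
    · rintro (h' | ⟨_, hss⟩)
      · exact absurd h' (lt_irrefl _)
      · exact hss
    · intro hlt
      exact Or.inr ⟨rfl, hlt⟩

-- ===== VERDICT (by name: the statement is the Claim_ definition above) =====
theorem sort_subkeys_by_priority_spec : Claim_equal_sort_subkeys_by_priority := by
  intro grouped ns_order key_priority_map _
  unfold Spec_sort_subkeys_by_priority sort_subkeys_by_priority sort_subkeys_by_priority_alt
  set g : PySem.Dict String (PySem.Dict String String) :=
    PySem.Dict.ofList (grouped.map (fun p => (p.1, PySem.Dict.ofList p.2))) with hg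
  set pm : PySem.Dict String Int := PySem.Dict.ofList (key_priority_map.getD []) with hpm
  have hstep : ∀ (out : PySem.Dict String (PySem.Dict String String)) (ns : String),
      (match g.get? ns with
       | none => out
       | some sub =>
         if sub.items.isEmpty then out
         else out.insert ns (PySem.Dict.ofList
           (PySem.List.sorted2 sub.items
             (fun kv => (pvSortKeyA (!pm.items.isEmpty) pm ns kv.1).1)
             (fun kv => (pvSortKeyA (!pm.items.isEmpty) pm ns kv.1).2) false)))
      = (match g.get? ns with
       | none => out
       | some sub =>
         if sub.items.isEmpty then out
         else
           out.insert ns (PySem.Dict.ofList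
             ((PySem.List.sorted
                ((sub.items.filter (fun kv => (pm.get? (pvFullKey ns kv.1)).isSome)).map
                  (fun kv => ((pm.get? (pvFullKey ns kv.1)).getD 0, kv.1, kv.2)))
                (fun t => t.1) false).map (fun t => (t.2.1, t.2.2))
              ++ PySem.List.sorted
                  (sub.items.filter (fun kv => !(pm.get? (pvFullKey ns kv.1)).isSome))
                  (fun kv => PySem.Str.lower kv.1) false))) := by
    intro out ns
    cases hget : g.get? ns with
    | none => rfl
    | some sub =>
      by_cases he : sub.items.isEmpty = true
      · simp [he]
      · simp only [he, Bool.false_eq_true, if_false]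
        congr 1
        have hk1 : (fun kv : String × String => (pvSortKeyA (!pm.items.isEmpty) pm ns kv.1).1)
            = fun kv => (pvKeyT pm ns kv).1 := funext fun kv => by rw [pv_keyA_eq]
        have hk2 : (fun kv : String × String => (pvSortKeyA (!pm.items.isEmpty) pm ns kv.1).2)
            = fun kv => (pvKeyT pm ns kv).2 := funext fun kv => by rw [pv_keyA_eq]
        rw [hk1, hk2, pv_inner_eq]
  have : ns_order.foldl (fun out ns =>
      match g.get? ns with
      | none => out
      | some sub =>
        if sub.items.isEmpty then out
        else out.insert ns (PySem.Dict.ofList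
          (PySem.List.sorted2 sub.items
            (fun kv => (pvSortKeyA (!pm.items.isEmpty) pm ns kv.1).1)
            (fun kv => (pvSortKeyA (!pm.items.isEmpty) pm ns kv.1).2) false))) g
    = ns_order.foldl (fun out ns =>
      match g.get? ns with
      | none => out
      | some sub =>
        if sub.items.isEmpty then out
        else
          out.insert ns (PySem.Dict.ofList
            ((PySem.List.sorted
               ((sub.items.filter (fun kv => (pm.get? (pvFullKey ns kv.1)).isSome)).map
                 (fun kv => ((pm.get? (pvFullKey ns kv.1)).getD 0, kv.1, kv.2)))
               (fun t => t.1) false).map (fun t => (t.2.1, t.2.2))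
             ++ PySem.List.sorted
                 (sub.items.filter (fun kv => !(pm.get? (pvFullKey ns kv.1)).isSome))
                 (fun kv => PySem.Str.lower kv.1) false))) g :=
    PySem.List.foldl_congr_mem _ _ _ _ (fun out ns hm => hstep out ns)
  exact congrArg (fun out : PySem.Dict String (PySem.Dict String String) => out.items.map (fun p => (p.1, p.2.items))) this
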